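-- pv_equiv track=rewrite | github.com/jwongso/hyni_py | general_context.py | _is_base64_encoded
-- ===== SOURCE A (Python) =====
-- def _is_base64_encoded(data: str) -> bool:
--     """
--     Check if a string is base64 encoded.
--
--     Args:
--         data: The string to check
--
--     Returns:
--         True if the string appears to be base64 encoded, False otherwise
--     """
--     if not data:
--         return False
--
--     # Check for data URI scheme (e.g., "data:image/png;base64,...")
--     if data.startswith("data:") and ";base64," in data:
--         return True
--
--     # Check for valid Base64 characters (ignoring whitespace)
--     base64_chars = set("ABCDEFGHIJKLMNOPQRSTUVWXYZabcdefghijklmnopqrstuvwxyz0123456789+/=")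
--
--     padding = 0
--     data_len = 0  # Counts non-whitespace chars
--
--     for c in data:
--         if c.isspace():
--             continue  # Skip whitespace
--         if c not in base64_chars:
--             return False  # Invalid character
--         if c == '=':
--             padding += 1
--             if padding > 2:
--                 return False  # Max 2 padding chars
--         data_len += 1
--
--     # Validate length and padding (Base64 length must be divisible by 4)
--     return (data_len % 4 == 0) and (padding != 1)  # 1 padding char is invalid
-- ===== SOURCE B (Python) =====
-- _BASE64_CHARS = set("ABCDEFGHIJKLMNOPQRSTUVWXYZabcdefghijklmnopqrstuvwxyz0123456789+/=")
--
-- def _is_base64_encoded(data: str) -> bool: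
--     if not data:
--         return False
--     if data.startswith("data:") and ";base64," in data:
--         return True
--     cleaned = [c for c in data if not c.isspace()]
--     if not set(cleaned) <= _BASE64_CHARS:
--         return False
--     padding = cleaned.count('=')
--     return len(cleaned) % 4 == 0 and padding <= 2 and padding != 1
-- ===== Notes on version B (the rewrite author's own statement) =====
-- stated objective: simpler
-- what changed: Replaces A's single stateful character loop (with mid-loop early returns and padding/length counters) by whole-string passes: filter out whitespace, one subset check against the base64 alphabet, one count of the padding character, and a final arithmetic condition.
import Mathlib
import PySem

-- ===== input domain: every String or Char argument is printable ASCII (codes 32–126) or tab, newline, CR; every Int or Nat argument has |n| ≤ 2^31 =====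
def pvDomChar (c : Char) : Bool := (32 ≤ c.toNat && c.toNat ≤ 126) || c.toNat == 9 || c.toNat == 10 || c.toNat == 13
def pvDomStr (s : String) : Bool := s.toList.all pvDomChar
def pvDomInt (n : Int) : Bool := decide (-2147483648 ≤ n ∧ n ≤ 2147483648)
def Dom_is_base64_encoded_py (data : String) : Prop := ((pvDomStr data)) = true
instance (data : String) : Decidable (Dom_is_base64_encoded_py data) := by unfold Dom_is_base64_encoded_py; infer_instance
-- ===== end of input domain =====

-- ===== PORT A =====
-- B simplifies A's single stateful loop into whole-string passes (filter, subset check, count); same values everywhere.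
def pvB64Chars : List Char :=
  PySem.Set.ofList "ABCDEFGHIJKLMNOPQRSTUVWXYZabcdefghijklmnopqrstuvwxyz0123456789+/=".toList

def pvLoopA : List Char → Nat → Nat → Bool
  | [], padding, dataLen => (dataLen % 4 == 0) && (padding != 1)
  | c :: rest, padding, dataLen =>
    if PySem.Str.isspace c then pvLoopA rest padding dataLen
    else if !(PySem.Set.contains pvB64Chars c) then false
    else if c == '=' then
      (if padding + 1 > 2 then false else pvLoopA rest (padding + 1) (dataLen + 1))
    else pvLoopA rest padding (dataLen + 1)

def is_base64_encoded_py (data : String) : Bool :=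
  if data = "" then false
  else if PySem.Str.startswith data "data:" && PySem.Str.isIn ";base64," data then true
  else pvLoopA data.toList 0 0

-- ===== PORT B =====
def is_base64_encoded_py_alt (data : String) : Bool :=
  if data = "" then false
  else if PySem.Str.startswith data "data:" && PySem.Str.isIn ";base64," data then true
  else
    let cleaned := data.toList.filter (fun c => !PySem.Str.isspace c)
    if !(PySem.Set.ofList cleaned).all (fun c => PySem.Set.contains pvB64Chars c) then false
    else
      let padding := cleaned.count '='
      (cleaned.length % 4 == 0) && (padding ≤ 2) && (padding != 1)

-- ===== PRECONDITION & SPEC =====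
def Spec_is_base64_encoded_py (data : String) (out : Bool) : Prop := out = is_base64_encoded_py_alt data
instance (data : String) (out : Bool) : Decidable (Spec_is_base64_encoded_py data out) := by unfold Spec_is_base64_encoded_py; infer_instance

-- ===== CLAIM (what is proved, stated in full; the proofs are below) =====
def Claim_equal_is_base64_encoded_py : Prop := ∀ (data : String), Dom_is_base64_encoded_py data → Spec_is_base64_encoded_py data (is_base64_encoded_py data)

-- ===== LEMMAS AND PROOFS =====
-- A's loop, for padding p ≤ 2, equals B's whole-pass formula shifted by (p, n).
theorem pvLoopA_eq (l : List Char) : ∀ p n : Nat, p ≤ 2 →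
    pvLoopA l p n =
      (if (l.filter (fun c => !PySem.Str.isspace c)).all (fun c => PySem.Set.contains pvB64Chars c) then
         ((n + (l.filter (fun c => !PySem.Str.isspace c)).length) % 4 == 0)
           && decide (p + (l.filter (fun c => !PySem.Str.isspace c)).count '=' ≤ 2)
           && ((p + (l.filter (fun c => !PySem.Str.isspace c)).count '=') != 1)
       else false) := by
  induction l with
  | nil =>
    intro p n hp
    simp [pvLoopA, hp]
  | cons c rest ih =>
    intro p n hp
    by_cases hs : PySem.Str.isspace c = true
    · simpa [pvLoopA, hs] using ih p n hp
    · by_cases hv : PySem.Set.contains pvB64Chars c = true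
      · by_cases he : c = '='
        · subst he
          have hsp : (fun c => !PySem.Str.isspace c) '=' = true := by decide
          by_cases h2 : p + 1 > 2
          · have hp2 : p = 2 := by omega
            subst hp2
            rw [show pvLoopA ('=' :: rest) 2 n = false by
              conv_lhs => rw [pvLoopA]
              rw [if_neg (by decide), if_neg (by rw [hv]; decide), if_pos (by decide), if_pos h2]]
            rw [show List.filter (fun c => !PySem.Str.isspace c) ('=' :: rest) = '=' :: List.filter (fun c => !PySem.Str.isspace c) rest from List.filter_cons_of_pos (by decide)]
            split_ifs with h
            · rw [List.count_cons_self]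
              simp
            · rfl
          · rw [show pvLoopA ('=' :: rest) p n = pvLoopA rest (p + 1) (n + 1) by
              conv_lhs => rw [pvLoopA]
              rw [if_neg (by decide), if_neg (by rw [hv]; decide), if_pos (by decide), if_neg h2]]
            rw [ih (p + 1) (n + 1) (by omega)]
            rw [show List.filter (fun c => !PySem.Str.isspace c) ('=' :: rest) = '=' :: List.filter (fun c => !PySem.Str.isspace c) rest from List.filter_cons_of_pos (by decide)]
            simp only [List.count_cons_self, List.all_cons, hv, List.length_cons, Bool.true_and]
            generalize (List.filter (fun c => !PySem.Str.isspace c) rest).length = L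
            generalize List.count '=' (List.filter (fun c => !PySem.Str.isspace c) rest) = C
            rw [show n + 1 + L = n + (L + 1) by omega, show p + 1 + C = p + (C + 1) by omega]
        · have hsp : (fun x => !PySem.Str.isspace x) c = true := by simp [hs]
          rw [show pvLoopA (c :: rest) p n = pvLoopA rest p (n + 1) by
              conv_lhs => rw [pvLoopA]
              rw [if_neg hs, if_neg (by rw [hv]; decide), if_neg (by simpa using he)]]
          rw [ih p (n + 1) hp]
          rw [show List.filter (fun x => !PySem.Str.isspace x) (c :: rest) = c :: List.filter (fun x => !PySem.Str.isspace x) rest from List.filter_cons_of_pos hsp]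
          rw [List.count_cons_of_ne he]
          simp only [List.all_cons, hv, List.length_cons, Bool.true_and]
          generalize (List.filter (fun c => !PySem.Str.isspace c) rest).length = L
          rw [show n + 1 + L = n + (L + 1) by omega]
      · have hvf : PySem.Set.contains pvB64Chars c = false := by
          cases h : PySem.Set.contains pvB64Chars c
          · rfl
          · exact absurd h hv
        conv_lhs => rw [pvLoopA]
        rw [if_neg hs, if_pos (by rw [hvf]; decide)]
        rw [show List.filter (fun x => !PySem.Str.isspace x) (c :: rest) = c :: List.filter (fun x => !PySem.Str.isspace x) rest from List.filter_cons_of_pos (by simp [hs])]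
        rw [if_neg (by simp only [List.all_cons]; rw [hvf]; simp)]

theorem pvOfList_all (f : List Char) :
    (PySem.Set.ofList f).all (fun c => PySem.Set.contains pvB64Chars c)
      = f.all (fun c => PySem.Set.contains pvB64Chars c) := by
  rw [Bool.eq_iff_iff]
  simp only [List.all_eq_true]
  constructor <;> intro h x hx
  · exact h x ((PySem.Set.mem_ofList f x).mpr hx)
  · exact h x ((PySem.Set.mem_ofList f x).mp hx)

-- ===== VERDICT (by name: the statement is the Claim_ definition above) =====
theorem is_base64_encoded_py_spec : Claim_equal_is_base64_encoded_py := by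
  intro data _
  unfold Spec_is_base64_encoded_py is_base64_encoded_py is_base64_encoded_py_alt
  by_cases h0 : data = ""
  · rw [if_pos h0, if_pos h0]
  · rw [if_neg h0, if_neg h0]
    by_cases h1 : (PySem.Str.startswith data "data:" && PySem.Str.isIn ";base64," data) = true
    · rw [if_pos h1, if_pos h1]
    · rw [if_neg h1, if_neg h1]
      rw [pvLoopA_eq data.toList 0 0 (by omega)]
      show _ = (if (!(PySem.Set.ofList (data.toList.filter (fun c => !PySem.Str.isspace c))).all
            (fun c => PySem.Set.contains pvB64Chars c)) = true then false
          else ((data.toList.filter (fun c => !PySem.Str.isspace c)).length % 4 == 0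
            && decide ((data.toList.filter (fun c => !PySem.Str.isspace c)).count '=' ≤ 2)
            && ((data.toList.filter (fun c => !PySem.Str.isspace c)).count '=' != 1)))
      rw [pvOfList_all]
      by_cases hv : (data.toList.filter (fun c => !PySem.Str.isspace c)).all
          (fun c => PySem.Set.contains pvB64Chars c) = true
      · rw [if_pos hv, if_neg (by rw [hv]; decide)]
        simp only [Nat.zero_add]
      · rw [if_neg hv, if_pos (by
          cases h : (data.toList.filter (fun c => !PySem.Str.isspace c)).all
              (fun c => PySem.Set.contains pvB64Chars c)
          · rfl
          · exact absurd h hv)]
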